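-- pv_equiv track=rewrite | github.com/DalavanCloud/UGESCO | functions/NLTK_NER.py | rechunk
-- ===== SOURCE A (Python) =====
-- def rechunk(ner_output):
--     """regroupe les entités par type si elles sont consécutives.
--     [('Jean', 'I-PERS'), ('Duvieusart', 'I-PERS')] devient ainsi
--     [('Jean Duvieusart', 'I-PERS')]"""
--     chunked, pos, prev_tag = [], "", None
--     for i, word_pos in enumerate(ner_output):
--         word, pos = word_pos
--         if pos in ['I-PERS', 'I-LIEU', 'I-ORG'] and pos == prev_tag:
--             chunked[-1] += word_pos
--         else:
--             chunked.append(word_pos)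
--         prev_tag = pos
--
--     clean_chunked = [tuple([" ".join(wordpos[::2]), wordpos[-1]])
--                      if len(wordpos) != 2 else wordpos for wordpos in chunked]
--
--     return clean_chunked
-- ===== SOURCE B (Python) =====
-- def rechunk(ner_output):
--     """Group-first-then-map: find each maximal run of equal consecutive tags
--     with two indices, then emit it merged (entity tags) or element-wise."""
--     out, i, n = [], 0, len(ner_output)
--     while i < n:
--         tag = ner_output[i][1]
--         j = i + 1
--         while j < n and ner_output[j][1] == tag:
--             j += 1
--         if tag in ('I-PERS', 'I-LIEU', 'I-ORG'):
--             out.append((" ".join(w for w, _ in ner_output[i:j]), tag))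
--         else:
--             out.extend(ner_output[i:j])
--         i = j
--     return out
-- ===== Notes on version B (the rewrite author's own statement) =====
-- stated objective: alternative
-- what changed: Replaces A's two-phase pass (accumulate flat chunks by repeated last-element concatenation, then a clean-up comprehension) with a single group-first two-pointer scan that finds each maximal run of equal tags and emits it directly, merged for entity tags or element-wise otherwise.
import Mathlib
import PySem

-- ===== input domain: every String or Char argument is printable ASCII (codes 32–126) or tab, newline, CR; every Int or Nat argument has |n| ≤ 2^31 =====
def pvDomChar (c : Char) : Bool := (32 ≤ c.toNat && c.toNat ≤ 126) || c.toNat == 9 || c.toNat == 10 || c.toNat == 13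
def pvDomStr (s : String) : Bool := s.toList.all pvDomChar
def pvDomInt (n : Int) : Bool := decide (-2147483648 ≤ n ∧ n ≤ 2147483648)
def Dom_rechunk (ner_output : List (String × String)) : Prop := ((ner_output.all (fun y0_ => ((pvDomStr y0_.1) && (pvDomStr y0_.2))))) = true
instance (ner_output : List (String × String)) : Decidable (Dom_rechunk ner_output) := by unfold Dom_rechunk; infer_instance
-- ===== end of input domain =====

-- B replaces A's accumulate-then-clean two-phase pass by a group-first two-pointer scan
-- that emits each maximal run of equal tags directly (alternative decomposition, same cost).
-- If the caller passes mutable lists as pairs, Python A's '+=' can mutate them in place and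
-- B does not; the equivalence proved here is about the RETURN value only (tuple inputs).

-- ===== PORT A =====
-- 'pos in ['I-PERS', 'I-LIEU', 'I-ORG']'
def entA (p : String) : Bool := p == "I-PERS" || p == "I-LIEU" || p == "I-ORG"

-- 'chunked[-1] += word_pos': rebuild the list with its last element extended.
-- (Python raises on an empty list; the merge branch is only reachable with a
-- previous chunk present, so the [] case is unreachable and returns [].)
def appendLast (xs : List (List String)) (a : List String) : List (List String) :=
  match xs with
  | [] => []
  | [x] => [x ++ a]
  | x :: y :: rest => x :: appendLast (y :: rest) a

-- one iteration of A's for-loop; the state is (chunked, prev_tag)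
def stepA (st : List (List String) × Option String) (wp : String × String) :
    List (List String) × Option String :=
  if entA wp.2 && (st.2 == some wp.2) then (appendLast st.1 [wp.1, wp.2], some wp.2)
  else (st.1 ++ [[wp.1, wp.2]], some wp.2)

-- 'wordpos[::2]' on the flat chunk (hand-ported step slice, exact for these lists)
def everyOther : List String → List String
  | [] => []
  | [x] => [x]
  | x :: _ :: rest => x :: everyOther rest

-- the comprehension's body; chunks are always nonempty so the getD defaults are unreachable
def cleanA (l : List String) : String × String :=
  if l.length ≠ 2 then (PySem.Str.join " " (everyOther l), l.getLast?.getD "")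
  else (l.headD "", (l[1]?).getD "")

def rechunk (ner_output : List (String × String)) : List (String × String) :=
  ((ner_output.foldl stepA ([], none)).1).map cleanA

-- ===== PORT B =====
-- "tag in ('I-PERS', 'I-LIEU', 'I-ORG')"
def entB (p : String) : Bool := p == "I-PERS" || p == "I-LIEU" || p == "I-ORG"

-- B's inner while loop: split off the maximal prefix whose tags equal t
def spanTag (t : String) : List (String × String) → List (String × String) × List (String × String)
  | [] => ([], [])
  | (w, u) :: rest =>
    if u == t then
      let s := spanTag t rest
      ((w, u) :: s.1, s.2)
    else ([], (w, u) :: rest)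

theorem spanTag_snd_length (t : String) (xs : List (String × String)) :
    (spanTag t xs).2.length ≤ xs.length := by
  induction xs with
  | nil => simp [spanTag]
  | cons x rest ih =>
    obtain ⟨w, u⟩ := x
    simp only [spanTag]
    split
    · exact Nat.le_succ_of_le ih
    · simp

-- B's outer while loop: one maximal run per step
def rechunk_alt (ner_output : List (String × String)) : List (String × String) :=
  match ner_output with
  | [] => []
  | (w, t) :: rest =>
    let s := spanTag t rest
    if entB t then (PySem.Str.join " " (w :: s.1.map Prod.fst), t) :: rechunk_alt s.2
    else (w, t) :: (s.1 ++ rechunk_alt s.2)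
termination_by ner_output.length
decreasing_by
  all_goals
    have h := spanTag_snd_length t rest
    simp only [List.length_cons]
    omega

-- ===== PRECONDITION & SPEC =====
def Spec_rechunk (ner_output : List (String × String)) (out : List (String × String)) : Prop := out = rechunk_alt ner_output
instance (ner_output : List (String × String)) (out : List (String × String)) : Decidable (Spec_rechunk ner_output out) := by unfold Spec_rechunk; infer_instance

-- ===== CLAIM (what is proved, stated in full; the proofs are below) =====
def Claim_equal_rechunk : Prop := ∀ (ner_output : List (String × String)), Dom_rechunk ner_output → Spec_rechunk ner_output (rechunk ner_output)

-- ===== LEMMAS AND PROOFS =====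

-- what A's loop does to the tail of the list, as a recursion (c = open chunk, t = prev_tag)
def finish (c : List String) (t : String) : List (String × String) → List (List String)
  | [] => [c]
  | (w, p) :: rest =>
    if entA p && (some t == some p) then finish (c ++ [w, p]) p rest
    else c :: finish [w, p] p rest

-- A's whole result for a tail starting a fresh chunk
def contA : List (String × String) → List (String × String)
  | [] => []
  | (w, t) :: rest => (finish [w, t] t rest).map cleanA

theorem appendLast_append (acc : List (List String)) (c a : List String) :
    appendLast (acc ++ [c]) a = acc ++ [c ++ a] := by
  induction acc with
  | nil => simp [appendLast]
  | cons x acc ih =>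
    cases acc with
    | nil => simp [appendLast]
    | cons y acc' => simpa [appendLast] using ih

theorem foldA_finish (xs : List (String × String)) :
    ∀ (acc : List (List String)) (c : List String) (t : String),
    (xs.foldl stepA (acc ++ [c], some t)).1 = acc ++ finish c t xs := by
  induction xs with
  | nil => intro acc c t; simp [finish]
  | cons x rest ih =>
    intro acc c t
    obtain ⟨w, p⟩ := x
    by_cases h : entA p && (some t == some p)
    · simp only [List.foldl_cons, stepA, h, if_pos, finish, appendLast_append]
      exact ih acc (c ++ [w, p]) p
    · simp only [List.foldl_cons, stepA, h, if_neg, finish, Bool.false_eq_true,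
        not_false_eq_true, if_neg]
      rw [show acc ++ [c] ++ [[w, p]] = (acc ++ [c]) ++ [[w, p]] by simp,
        ih (acc ++ [c]) [w, p] p]
      simp

theorem everyOther_flat (t : String) (ws : List String) :
    everyOther (ws.flatMap (fun w => [w, t])) = ws := by
  induction ws with
  | nil => simp [everyOther]
  | cons w ws ih => simpa [everyOther] using ih

theorem getLast_flat (t w : String) (ws : List String) :
    (([w, t] ++ ws.flatMap (fun w' => [w', t])).getLast?).getD "" = t := by
  induction ws generalizing w with
  | nil => simp
  | cons w' ws ih => simpa using ih w'

theorem join_singleton' (w : String) : PySem.Str.join " " [w] = w := by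
  simp [PySem.Str.join]

theorem cleanA_pair (w t : String) : cleanA [w, t] = (w, t) := by
  simp [cleanA]

theorem cleanA_chunk (w t : String) (ws : List String) :
    cleanA ([w, t] ++ ws.flatMap (fun w' => [w', t])) =
      (PySem.Str.join " " (w :: ws), t) := by
  cases ws with
  | nil => simp [cleanA_pair, join_singleton']
  | cons w' ws' =>
    have hlen : ([w, t] ++ (w' :: ws').flatMap (fun w'' => [w'', t])).length ≠ 2 := by
      simp [List.length_flatMap]
    simp only [cleanA, hlen, if_pos, ne_eq, not_false_eq_true]
    rw [getLast_flat]
    have : everyOther ([w, t] ++ (w' :: ws').flatMap (fun w'' => [w'', t]))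
        = w :: (w' :: ws') := by
      simpa [everyOther] using everyOther_flat t (w' :: ws')
    rw [this]

theorem finish_ent (t : String) (ht : entA t = true) (xs : List (String × String)) :
    ∀ c, (finish c t xs).map cleanA =
      cleanA (c ++ ((spanTag t xs).1.map Prod.fst).flatMap (fun w' => [w', t]))
        :: contA (spanTag t xs).2 := by
  induction xs with
  | nil => intro c; simp [finish, spanTag, contA]
  | cons x rest ih =>
    intro c
    obtain ⟨w, u⟩ := x
    by_cases h : u == t
    · have hu : u = t := eq_of_beq h
      subst hu
      have hf : finish c u ((w, u) :: rest) = finish (c ++ [w, u]) u rest := by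
        simp [finish, ht]
      have hs : spanTag u ((w, u) :: rest) = ((w, u) :: (spanTag u rest).1, (spanTag u rest).2) := by
        simp [spanTag]
      rw [hf, ih (c ++ [w, u]), hs]
      simp
    · have hne : ¬ (entA u && (some t == some u)) = true := by
        simp only [Bool.and_eq_true, Option.some_beq_some]
        rintro ⟨-, h2⟩
        exact h (by simpa [BEq.comm] using h2)
      have hf : finish c t ((w, u) :: rest) = c :: finish [w, u] u rest := by
        simp only [finish]
        rw [if_neg hne]
      rw [hf]
      simp [spanTag, h, contA]

theorem finish_nonent (t w : String) (ht : entA t = false) (xs : List (String × String)) :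
    (finish [w, t] t xs).map cleanA = (w, t) :: contA xs := by
  cases xs with
  | nil => simp [finish, contA, cleanA_pair]
  | cons x rest =>
    obtain ⟨w', u⟩ := x
    have hne : ¬ (entA u && (some t == some u)) = true := by
      simp only [Bool.and_eq_true, Option.some_beq_some]
      rintro ⟨h1, h2⟩
      rw [eq_of_beq h2] at ht
      rw [ht] at h1
      exact Bool.false_ne_true h1
    have hf : finish [w, t] t ((w', u) :: rest) = [w, t] :: finish [w', u] u rest := by
      simp only [finish]
      rw [if_neg hne]
    rw [hf]
    simp [cleanA_pair, contA]

theorem contA_run (t : String) (ht : entA t = false) (n : Nat)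
    (IH : ∀ ys : List (String × String), ys.length ≤ n → contA ys = rechunk_alt ys) :
    ∀ ys : List (String × String), ys.length ≤ n →
      contA ys = (spanTag t ys).1 ++ rechunk_alt (spanTag t ys).2 := by
  intro ys
  induction ys with
  | nil => intro _; simp [spanTag, contA, rechunk_alt]
  | cons x rest ih =>
    intro hlen
    obtain ⟨w', u⟩ := x
    by_cases h : u == t
    · have hu : u = t := eq_of_beq h
      have hrest : rest.length ≤ n := le_trans (Nat.le_succ _) hlen
      simp only [spanTag, h, if_pos, contA]
      rw [finish_nonent u w' (hu ▸ ht) rest, ih hrest]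
      simp
    · simp only [spanTag, h, Bool.false_eq_true, if_neg, not_false_eq_true]
      exact IH _ hlen

theorem contA_eq_alt (n : Nat) :
    ∀ xs : List (String × String), xs.length ≤ n → contA xs = rechunk_alt xs := by
  induction n with
  | zero =>
    intro xs hlen
    rw [List.length_eq_zero_iff.mp (Nat.le_zero.mp hlen)]
    simp [contA, rechunk_alt]
  | succ n ih =>
    intro xs hlen
    cases xs with
    | nil => simp [contA, rechunk_alt]
    | cons x rest =>
      obtain ⟨w, t⟩ := x
      have hrest : rest.length ≤ n := Nat.lt_succ_iff.mp (by simpa using hlen)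
      by_cases ht : entA t
      · have htB : entB t = true := ht
        simp only [contA]
        rw [finish_ent t ht rest [w, t], cleanA_chunk,
          ih _ (le_trans (spanTag_snd_length t rest) hrest)]
        simp [rechunk_alt, htB]
      · have htF : entA t = false := by simpa using ht
        have htB : entB t = false := htF
        simp only [contA]
        rw [finish_nonent t w htF rest, contA_run t htF n ih rest hrest]
        simp [rechunk_alt, htB]

theorem rechunk_eq_contA (xs : List (String × String)) : rechunk xs = contA xs := by
  cases xs with
  | nil => simp [rechunk, contA]
  | cons x rest =>
    obtain ⟨w, t⟩ := x
    have h0 : stepA ([], none) (w, t) = ([] ++ [[w, t]], some t) := by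
      simp [stepA]
    have hfold := foldA_finish rest [] [w, t] t
    simp only [List.nil_append] at hfold
    simp only [rechunk, List.foldl_cons, h0, List.nil_append, hfold, contA]

-- ===== VERDICT (by name: the statement is the Claim_ definition above) =====
theorem rechunk_spec : Claim_equal_rechunk := by
  intro ner _
  unfold Spec_rechunk
  rw [rechunk_eq_contA, contA_eq_alt ner.length ner (le_refl _)]
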